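-- pv_equiv track=rewrite | github.com/develoPHM/algorithm | programmers/Lv_1/카드 뭉치/카드 뭉치.py | solution
-- ===== SOURCE A (Python) =====
-- def solution(cards1, cards2, goal):
--     for c in goal:
--         if cards1 and c == cards1[0]:
--             cards1.pop(0)
--         elif cards2 and c == cards2[0]:
--             cards2.pop(0)
--         else:
--             return "No"
--     return "Yes"
-- ===== SOURCE B (Python) =====
-- def solution(cards1, cards2, goal):
--     i = j = 0
--     for c in goal:
--         if i < len(cards1) and cards1[i] == c:
--             i += 1
--         elif j < len(cards2) and cards2[j] == c:
--             j += 1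
--         else:
--             return "No"
--     return "Yes"
-- ===== Notes on version B (the rewrite author's own statement) =====
-- stated objective: faster
-- what changed: Replaces the repeated cards1.pop(0)/cards2.pop(0) (each O(n) list shifting, and mutating the arguments) with two advancing index pointers, a single O(n) pass with no mutation.
import Mathlib
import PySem

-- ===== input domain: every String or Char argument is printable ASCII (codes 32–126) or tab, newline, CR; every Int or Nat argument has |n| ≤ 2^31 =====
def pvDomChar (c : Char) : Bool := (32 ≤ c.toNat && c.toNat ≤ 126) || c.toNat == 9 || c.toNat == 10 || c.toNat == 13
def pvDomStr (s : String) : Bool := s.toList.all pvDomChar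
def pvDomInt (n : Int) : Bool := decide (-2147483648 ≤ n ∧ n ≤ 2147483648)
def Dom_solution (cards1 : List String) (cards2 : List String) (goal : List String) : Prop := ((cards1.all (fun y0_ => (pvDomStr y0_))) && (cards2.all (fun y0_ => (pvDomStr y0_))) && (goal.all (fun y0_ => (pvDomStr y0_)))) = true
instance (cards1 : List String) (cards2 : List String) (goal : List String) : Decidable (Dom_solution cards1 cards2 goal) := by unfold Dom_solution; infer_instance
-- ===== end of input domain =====

-- ===== PORT A =====
-- A mutates cards1/cards2 in place (pop(0)); the equivalence is about the return value only.
def solLoopA : List String → List String → List String → String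
  | _, _, [] => "Yes"
  | c1, c2, g :: gs =>
    if c1.head? = some g then solLoopA c1.tail c2 gs
    else if c2.head? = some g then solLoopA c1 c2.tail gs
    else "No"

def solution (cards1 : List String) (cards2 : List String) (goal : List String) : String :=
  solLoopA cards1 cards2 goal

-- ===== PORT B =====
-- B: two index pointers i, j advance along cards1/cards2; no popping, one O(n) pass.
def solLoopB (c1 c2 : List String) : List String → Int → Int → String
  | [], _, _ => "Yes"
  | g :: gs, i, j =>
    if i < (c1.length : Int) ∧ PySem.List.pyGet? c1 i = some g then
      solLoopB c1 c2 gs (i + 1) j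
    else if j < (c2.length : Int) ∧ PySem.List.pyGet? c2 j = some g then
      solLoopB c1 c2 gs i (j + 1)
    else "No"

def solution_alt (cards1 : List String) (cards2 : List String) (goal : List String) : String :=
  solLoopB cards1 cards2 goal 0 0

-- ===== PRECONDITION & SPEC =====
def Spec_solution (cards1 : List String) (cards2 : List String) (goal : List String) (out : String) : Prop := out = solution_alt cards1 cards2 goal
instance (cards1 : List String) (cards2 : List String) (goal : List String) (out : String) : Decidable (Spec_solution cards1 cards2 goal out) := by unfold Spec_solution; infer_instance

-- ===== CLAIM (what is proved, stated in full; the proofs are below) =====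
def Claim_equal_solution : Prop := ∀ (cards1 : List String) (cards2 : List String) (goal : List String), Dom_solution cards1 cards2 goal → Spec_solution cards1 cards2 goal (solution cards1 cards2 goal)

-- ===== LEMMAS AND PROOFS =====

-- ===== VERDICT (by name: the statement is the Claim_ definition above) =====
theorem loopB_eq_loopA (c1 c2 : List String) (gs : List String) :
    ∀ (i j : Nat), solLoopB c1 c2 gs (i : Int) (j : Int) = solLoopA (c1.drop i) (c2.drop j) gs := by
  induction gs with
  | nil => intro i j; simp [solLoopB, solLoopA]
  | cons g gs ih =>
    intro i j
    have h1 : (PySem.List.pyGet? c1 (i : Int) = some g) ↔ ((c1.drop i).head? = some g) := by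
      rw [PySem.List.pyGet?_natCast, List.head?_drop]
    have h2 : (PySem.List.pyGet? c2 (j : Int) = some g) ↔ ((c2.drop j).head? = some g) := by
      rw [PySem.List.pyGet?_natCast, List.head?_drop]
    simp only [solLoopB, solLoopA]
    by_cases hA : (c1.drop i).head? = some g
    · have hi : i < c1.length := by
        by_contra hn
        simp [List.drop_eq_nil_of_le (Nat.le_of_not_lt hn)] at hA
      have : ((i : Int) < (c1.length : Int) ∧ PySem.List.pyGet? c1 (i : Int) = some g) := by
        exact ⟨by exact_mod_cast hi, h1.mpr hA⟩
      rw [if_pos this, if_pos hA]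
      have := ih (i + 1) j
      simpa [List.tail_drop] using this
    · have hcond1 : ¬ ((i : Int) < (c1.length : Int) ∧ PySem.List.pyGet? c1 (i : Int) = some g) := by
        intro ⟨_, h⟩; exact hA (h1.mp h)
      rw [if_neg hcond1, if_neg hA]
      by_cases hB : (c2.drop j).head? = some g
      · have hj : j < c2.length := by
          by_contra hn
          simp [List.drop_eq_nil_of_le (Nat.le_of_not_lt hn)] at hB
        have : ((j : Int) < (c2.length : Int) ∧ PySem.List.pyGet? c2 (j : Int) = some g) := by
          exact ⟨by exact_mod_cast hj, h2.mpr hB⟩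
        rw [if_pos this, if_pos hB]
        have := ih i (j + 1)
        simpa [List.tail_drop] using this
      · have hcond2 : ¬ ((j : Int) < (c2.length : Int) ∧ PySem.List.pyGet? c2 (j : Int) = some g) := by
          intro ⟨_, h⟩; exact hB (h2.mp h)
        rw [if_neg hcond2, if_neg hB]

theorem solution_spec : Claim_equal_solution := by
  intro c1 c2 g _
  unfold Spec_solution solution solution_alt
  have := loopB_eq_loopA c1 c2 g 0 0
  simpa using this.symm
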